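-- pv_equiv track=rewrite | github.com/MrBrantCode/unitest_baseline | mut_generate/mist_train_taco/taco_2568/solution.py | sort_teams_by_points
-- ===== SOURCE A (Python) =====
-- def sort_teams_by_points(teams, include_blank_line=False):
--     """
--     Sorts teams by their points in descending order and returns a formatted list of team names and points.
--
--     Parameters:
--     - teams (list of tuples): Each tuple contains (team_name, wins, losses, draws).
--     - include_blank_line (bool): Whether to include a blank line between datasets. Defaults to False.
--
--     Returns:
--     - list of str: Each string is formatted as "team_name,points".
--     """
--     if not teams:
--         return []
--
--     d = {}
--     for team_name, wins, losses, draws in teams: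
--         points = wins * 3 + draws
--         if points in d:
--             d[points].append(team_name)
--         else:
--             d[points] = [team_name]
--
--     sorted_results = []
--     for points, team_names in sorted(d.items(), key=lambda x: x[0], reverse=True):
--         for team_name in team_names:
--             sorted_results.append(f"{team_name},{points}")
--
--     if include_blank_line:
--         sorted_results.append("")
--
--     return sorted_results
-- ===== SOURCE B (Python) =====
-- def sort_teams_by_points(teams, include_blank_line=False):
--     if not teams:
--         return []
--     result = [f"{name},{wins * 3 + draws}"
--               for name, wins, losses, draws in
--               sorted(teams, key=lambda t: t[1] * 3 + t[3], reverse=True)]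
--     if include_blank_line:
--         result.append("")
--     return result
-- ===== Notes on version B (the rewrite author's own statement) =====
-- stated objective: simpler
-- what changed: Dropped the points-keyed grouping dict, the sort of its items and the nested emit loops; B does one stable descending sort of the teams by points and one formatting pass (stability preserves A's insertion order within equal points).
import Mathlib
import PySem

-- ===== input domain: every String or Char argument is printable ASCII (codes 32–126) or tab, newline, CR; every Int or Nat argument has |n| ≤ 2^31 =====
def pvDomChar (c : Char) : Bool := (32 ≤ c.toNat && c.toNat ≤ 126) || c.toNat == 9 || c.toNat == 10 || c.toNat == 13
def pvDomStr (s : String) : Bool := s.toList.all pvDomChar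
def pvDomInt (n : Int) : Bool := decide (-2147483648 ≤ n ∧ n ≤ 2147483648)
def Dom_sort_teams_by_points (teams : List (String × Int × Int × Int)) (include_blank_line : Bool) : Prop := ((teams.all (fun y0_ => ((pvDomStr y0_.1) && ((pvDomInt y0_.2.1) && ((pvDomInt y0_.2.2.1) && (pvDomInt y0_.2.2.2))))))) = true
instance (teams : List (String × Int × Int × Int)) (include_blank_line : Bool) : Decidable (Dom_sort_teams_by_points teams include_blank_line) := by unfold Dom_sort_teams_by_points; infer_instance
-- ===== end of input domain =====

-- B replaces A's points-keyed grouping dict + key sort + nested emit loop by ONE stable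
-- descending sort of the teams followed by a single formatting pass (objective: simpler).


-- ===== PORT A =====
def sort_teams_by_points (teams : List (String × Int × Int × Int)) (include_blank_line : Bool) : List String :=
  if teams = [] then []
  else
    let d : PySem.Dict Int (List String) :=
      teams.foldl (fun d t =>
        let points := t.2.1 * 3 + t.2.2.2
        if d.contains points then d.modify points [] (fun l => l ++ [t.1])
        else d.insert points [t.1]) PySem.Dict.empty
    let sorted_results : List String :=
      (PySem.List.sorted d.items (fun x => x.1) true).foldl
        (fun acc pr => pr.2.foldl
          (fun acc2 name => acc2 ++ [name ++ "," ++ PySem.Int.toStr pr.1]) acc) []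
    if include_blank_line then sorted_results ++ [""] else sorted_results

-- ===== PORT B =====
def sort_teams_by_points_alt (teams : List (String × Int × Int × Int)) (include_blank_line : Bool) : List String :=
  if teams = [] then []
  else
    let result : List String :=
      (PySem.List.sorted teams (fun t => t.2.1 * 3 + t.2.2.2) true).map
        (fun t => t.1 ++ "," ++ PySem.Int.toStr (t.2.1 * 3 + t.2.2.2))
    if include_blank_line then result ++ [""] else result

-- ===== PRECONDITION & SPEC =====
def Spec_sort_teams_by_points (teams : List (String × Int × Int × Int)) (include_blank_line : Bool) (out : List String) : Prop := out = sort_teams_by_points_alt teams include_blank_line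
instance (teams : List (String × Int × Int × Int)) (include_blank_line : Bool) (out : List String) : Decidable (Spec_sort_teams_by_points teams include_blank_line out) := by unfold Spec_sort_teams_by_points; infer_instance

-- ===== CLAIM (what is proved, stated in full; the proofs are below) =====
def Claim_equal_sort_teams_by_points : Prop := ∀ (teams : List (String × Int × Int × Int)) (include_blank_line : Bool), Dom_sort_teams_by_points teams include_blank_line → Spec_sort_teams_by_points teams include_blank_line (sort_teams_by_points teams include_blank_line)

-- ===== LEMMAS AND PROOFS =====

-- insertBy steps over a prefix it does not insert before
theorem pv_insertBy_append {α : Type} (before : α → α → Bool) (x : α) (as bs : List α)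
    (h : ∀ a ∈ as, before x a = false) :
    PySem.List.insertBy before x (as ++ bs) = as ++ PySem.List.insertBy before x bs := by
  induction as with
  | nil => simp
  | cons a as ih =>
    simp only [List.cons_append, PySem.List.insertBy, h a (by simp)]
    simp only [ih (fun a ha => h a (by simp [ha])), Bool.false_eq_true, if_false]

-- insertBy puts x in front when it goes before everything
theorem pv_insertBy_front {α : Type} (before : α → α → Bool) (x : α) (l : List α)
    (h : ∀ a ∈ l, before x a = true) :
    PySem.List.insertBy before x l = x :: l := by
  cases l with
  | nil => rfl
  | cons a l => simp [PySem.List.insertBy, h a (by simp)]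

-- a reverse-sorted Nodup Int list is strictly decreasing
theorem pv_sorted_rev_gt (l : List Int) (h : l.Nodup) :
    List.Pairwise (fun a b => b < a) (PySem.List.sorted l (fun p => p) true) := by
  have h1 := PySem.List.sorted_pairwise_rev l (fun p => p)
  have h2 : (PySem.List.sorted l (fun p => p) true).Nodup :=
    ((PySem.List.sorted_perm l (fun p => p) true).nodup_iff).mpr h
  exact (h1.and h2).imp (fun hab => lt_of_le_of_ne hab.1 (Ne.symm hab.2))

-- inserting an element into the flatMap of strictly decreasing nonempty key groups
theorem pv_insertBy_flatMap {α : Type} (key : α → Int) (x : α) :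
    ∀ (ks : List Int) (g : Int → List α),
      List.Pairwise (fun a b => b < a) ks →
      (∀ p ∈ ks, ∀ y ∈ g p, key y = p) →
      (∀ p ∈ ks, g p ≠ []) →
      PySem.List.insertBy (fun a b => decide (key b < key a)) x (ks.flatMap g) =
        if key x ∈ ks then
          ks.flatMap (fun p => g p ++ if key x == p then [x] else [])
        else
          (ks.takeWhile (fun p => decide (key x < p))).flatMap g
            ++ x :: (ks.dropWhile (fun p => decide (key x < p))).flatMap g := by
  intro ks
  induction ks with
  | nil => intro g _ _ _; simp [PySem.List.insertBy]
  | cons p ks ih =>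
    intro g hpw hkey hne
    obtain ⟨hlt, hpw'⟩ := List.pairwise_cons.mp hpw
    rcases lt_trichotomy p (key x) with h | h | h
    · -- key x bigger than everything: goes in front
      have hnm : key x ∉ p :: ks := by
        intro hm; rcases List.mem_cons.mp hm with rfl | hm
        · exact absurd h (lt_irrefl _)
        · exact absurd (hlt _ hm) (by omega)
      have hfront : ∀ a ∈ (p :: ks).flatMap g, decide (key a < key x) = true := by
        intro a ha
        obtain ⟨q, hq, hag⟩ := List.mem_flatMap.mp ha
        have hkq := hkey q hq a hag
        have hqp : q ≤ p := by
          rcases List.mem_cons.mp hq with rfl | hq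
          · exact le_refl _
          · exact le_of_lt (hlt _ hq)
        rw [hkq]; simp; omega
      rw [if_neg hnm, pv_insertBy_front _ _ _ hfront]
      have htw : (p :: ks).takeWhile (fun q => decide (key x < q)) = [] := by
        simp; omega
      have hdw : (p :: ks).dropWhile (fun q => decide (key x < q)) = p :: ks := by
        simp; omega
      rw [htw, hdw]
      simp
    · -- key x = p: append to end of group p
      subst h
      rw [if_pos (List.mem_cons_self)]
      rw [List.flatMap_cons, List.flatMap_cons]
      have hskip : ∀ a ∈ g (key x), (fun a b => decide (key b < key a)) x a = false := by
        intro a ha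
        have := hkey (key x) (by simp) a ha
        simp [this]
      have hfront : ∀ a ∈ ks.flatMap g, decide (key a < key x) = true := by
        intro a ha
        obtain ⟨q, hq, hag⟩ := List.mem_flatMap.mp ha
        have h1 := hkey q (by simp [hq]) a hag
        have h2 := hlt _ hq
        rw [h1]; simp; omega
      rw [pv_insertBy_append _ _ _ _ hskip, pv_insertBy_front _ _ _ hfront]
      have hrest : ks.flatMap (fun q => g q ++ if key x == q then [x] else []) = ks.flatMap g := by
        apply List.flatMap_congr
        intro q hq
        have : key x ≠ q := by have := hlt _ hq; omega
        simp [this]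
      rw [hrest]
      simp
    · -- key x smaller than p: skip group p
      have hskip : ∀ a ∈ g p, (fun a b => decide (key b < key a)) x a = false := by
        intro a ha
        have := hkey p (by simp) a ha
        simp [this]; omega
      rw [List.flatMap_cons, pv_insertBy_append _ _ _ _ hskip]
      rw [ih g hpw' (fun q hq => hkey q (by simp [hq])) (fun q hq => hne q (by simp [hq]))]
      have hne' : key x ≠ p := by omega
      have htw : (p :: ks).takeWhile (fun q => decide (key x < q)) =
          p :: ks.takeWhile (fun q => decide (key x < q)) := by
        simp [h]
      have hdw : (p :: ks).dropWhile (fun q => decide (key x < q)) =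
          ks.dropWhile (fun q => decide (key x < q)) := by
        simp [h]
      by_cases hm : key x ∈ ks
      · rw [if_pos hm, if_pos (by simp [hm])]
        rw [List.flatMap_cons]
        have : (if key x == p then [x] else []) = ([] : List α) := by simp [hne']
        rw [this, List.append_nil]
      · rw [if_neg hm, if_neg (by simp [hm, hne'])]
        rw [htw, hdw, List.flatMap_cons, List.append_assoc]

-- in a strictly decreasing list, everything the dropWhile (k < _) keeps is ≤ k
theorem pv_dropWhile_le (k : Int) :
    ∀ (S : List Int), List.Pairwise (fun a b => b < a) S →
      ∀ d ∈ S.dropWhile (fun p => decide (k < p)), d ≤ k := by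
  intro S
  induction S with
  | nil => simp
  | cons a S ih =>
    intro hpw d hd
    obtain ⟨hlt, hpw'⟩ := List.pairwise_cons.mp hpw
    by_cases ha : k < a
    · rw [List.dropWhile_cons_of_pos (by simpa using ha)] at hd
      exact ih hpw' d hd
    · rw [List.dropWhile_cons_of_neg (by simpa using ha)] at hd
      rcases List.mem_cons.mp hd with rfl | hd
      · omega
      · have := hlt d hd; omega

theorem pv_sorted_snoc_not_mem (l : List Int) (k : Int) (hnd : l.Nodup) (hk : k ∉ l) :
    PySem.List.sorted (l ++ [k]) (fun p => p) true =
      (PySem.List.sorted l (fun p => p) true).takeWhile (fun p => decide (k < p))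
        ++ k :: (PySem.List.sorted l (fun p => p) true).dropWhile (fun p => decide (k < p)) := by
  have hS := pv_sorted_rev_gt l hnd
  have hsplit := List.takeWhile_append_dropWhile
    (p := fun p => decide (k < p)) (l := PySem.List.sorted l (fun p => p) true)
  set S := PySem.List.sorted l (fun p => p) true with hSdef
  set T := S.takeWhile (fun p => decide (k < p)) with hT
  set D := S.dropWhile (fun p => decide (k < p)) with hD
  have hmemS : ∀ a ∈ S, a ∈ l := fun a ha => (PySem.List.mem_sorted l _ true a).mp ha
  have hpw : List.Pairwise (fun a b => b < a) (T ++ D) := by rw [hsplit]; exact hS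
  obtain ⟨hpwT, hpwD, hTD⟩ := List.pairwise_append.mp hpw
  have hDk : ∀ d ∈ D, d < k := by
    intro d hd
    have hle : d ≤ k := pv_dropWhile_le k S hS d hd
    have hdl : d ∈ l := hmemS d ((List.dropWhile_sublist _).mem hd)
    exact lt_of_le_of_ne hle (fun he => hk (he ▸ hdl))
  apply PySem.List.sorted_rev_eq_of_perm_of_pairwise_gt
  · have h1 : (T ++ k :: D).Perm (k :: (T ++ D)) := List.perm_middle
    rw [hsplit] at h1
    have h2 : (k :: S).Perm (k :: l) := (PySem.List.sorted_perm l _ true).cons k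
    exact (h1.trans h2).trans (List.perm_append_singleton k l).symm
  · apply List.pairwise_append.mpr
    refine ⟨hpwT, List.pairwise_cons.mpr ⟨hDk, hpwD⟩, ?_⟩
    intro a ha b hb
    have hka : k < a := by
      have := List.mem_takeWhile_imp (hT ▸ ha)
      simpa using this
    rcases List.mem_cons.mp hb with rfl | hb
    · exact hka
    · have := hDk b hb; omega

theorem pv_dedup_snoc (l : List Int) (k : Int) :
    PySem.List.dedup (l ++ [k]) =
      if k ∈ l then PySem.List.dedup l else PySem.List.dedup l ++ [k] := by
  rw [PySem.List.dedup_eq_ofList, PySem.List.dedup_eq_ofList]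
  have h1 : PySem.Set.ofList (l ++ [k]) = PySem.Set.add (PySem.Set.ofList l) k := by
    simp [PySem.Set.ofList, List.foldl_append]
  rw [h1]
  by_cases hk : k ∈ l
  · rw [if_pos hk]
    have hc : (PySem.Set.ofList l).contains k = true :=
      List.elem_eq_true_of_mem ((PySem.Set.mem_ofList l k).mpr hk)
    simp [PySem.Set.add, hk]
  · rw [if_neg hk]
    have hc : ¬ (PySem.Set.ofList l).contains k = true := by
      intro h
      exact hk ((PySem.Set.mem_ofList l k).mp (List.mem_of_elem_eq_true h))
    simp [PySem.Set.add, hk]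

-- stability of Python's descending sort: the sorted list is the concatenation of the
-- original-order key groups, along the strictly decreasing list of distinct keys
theorem pv_sorted_rev_eq_flatMap {α : Type} (key : α → Int) (xs : List α) :
    PySem.List.sorted xs key true =
      (PySem.List.sorted (PySem.List.dedup (xs.map key)) (fun p => p) true).flatMap
        (fun p => xs.filter (fun y => key y == p)) := by
  induction xs using List.reverseRecOn with
  | nil => rfl
  | append_singleton xs x ih =>
    rw [PySem.List.sorted_rev_eq_foldl_insertBy, List.foldl_append]
    simp only [List.foldl_cons, List.foldl_nil]
    rw [← PySem.List.sorted_rev_eq_foldl_insertBy xs key, ih]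
    have hpw := pv_sorted_rev_gt _ (PySem.List.nodup_dedup (xs.map key))
    have hkey : ∀ p ∈ PySem.List.sorted (PySem.List.dedup (xs.map key)) (fun p => p) true,
        ∀ y ∈ xs.filter (fun y => key y == p), key y = p := by
      intro p _ y hy
      have := (List.mem_filter.mp hy).2
      simpa using this
    have hne : ∀ p ∈ PySem.List.sorted (PySem.List.dedup (xs.map key)) (fun p => p) true,
        xs.filter (fun y => key y == p) ≠ [] := by
      intro p hp
      have hpm : p ∈ xs.map key := by
        have := (PySem.List.mem_sorted _ _ true p).mp hp
        exact (PySem.List.mem_dedup _ p).mp this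
      obtain ⟨y, hy, hky⟩ := List.mem_map.mp hpm
      exact List.ne_nil_of_mem (List.mem_filter.mpr ⟨hy, by simp [hky]⟩)
    rw [pv_insertBy_flatMap key x _ _ hpw hkey hne]
    rw [List.map_append, List.map_cons, List.map_nil, pv_dedup_snoc]
    by_cases hm : key x ∈ xs.map key
    · rw [if_pos hm, if_pos (by
        rw [PySem.List.mem_sorted, PySem.List.mem_dedup]; exact hm)]
      apply List.flatMap_congr
      intro p _
      rw [List.filter_append]
      simp [List.filter_cons]
    · rw [if_neg hm, if_neg (by
        rw [PySem.List.mem_sorted, PySem.List.mem_dedup]; exact hm)]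
      rw [pv_sorted_snoc_not_mem _ _ (PySem.List.nodup_dedup _)
        (by rw [PySem.List.mem_dedup]; exact hm)]
      rw [List.flatMap_append, List.flatMap_cons]
      have hfx : (xs ++ [x]).filter (fun y => key y == key x) = [x] := by
        rw [List.filter_append]
        have h1 : xs.filter (fun y => key y == key x) = [] := by
          apply List.filter_eq_nil_iff.mpr
          intro y hy
          simp only [beq_iff_eq]
          intro he
          exact hm (List.mem_map.mpr ⟨y, hy, he⟩)
        simp [h1]
      have hcongr : ∀ L : List Int, (∀ p ∈ L, p ∈ PySem.List.dedup (xs.map key)) →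
          L.flatMap (fun p => (xs ++ [x]).filter (fun y => key y == p)) =
          L.flatMap (fun p => xs.filter (fun y => key y == p)) := by
        intro L hL
        apply List.flatMap_congr
        intro p hp
        have hpne : key x ≠ p := by
          intro he
          exact hm ((PySem.List.mem_dedup _ p).mp (hL p hp) |> (he ▸ ·))
        rw [List.filter_append]
        have : [x].filter (fun y => key y == p) = [] := by simp [hpne]
        simp [this]
      rw [hcongr _ (fun p hp => (PySem.List.mem_sorted _ _ true p).mp
            ((List.takeWhile_sublist _).mem hp)),
          hcongr _ (fun p hp => (PySem.List.mem_sorted _ _ true p).mp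
            ((List.dropWhile_sublist _).mem hp)),
          hfx]
      simp

-- a dict with Nodup keys is the list of its keys paired with their values
theorem pv_items_eq (d : PySem.Dict Int (List String)) (h : d.keys.Nodup) :
    d.items = d.keys.map (fun k => (k, d.getD k [])) := by
  show d.items = (d.items.map (fun pr => pr.1)).map (fun k => (k, d.getD k []))
  rw [List.map_map]
  have : d.items.map ((fun k => (k, d.getD k [])) ∘ (fun pr => pr.1)) = d.items.map id := by
    apply List.map_congr_left
    intro pr hpr
    have hv := PySem.Dict.getD_of_mem_items d (k := pr.1) (v := pr.2) hpr h []
    simp [Function.comp, hv]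
  rw [this, List.map_id]

-- the heart of the A side: grouping dict + key sort + nested emit = stable sort + format
theorem pv_core (teams : List (String × Int × Int × Int)) :
    (PySem.List.sorted (teams.foldl (fun d t =>
        let points := t.2.1 * 3 + t.2.2.2
        if d.contains points then d.modify points [] (fun l => l ++ [t.1])
        else d.insert points [t.1]) (PySem.Dict.empty : PySem.Dict Int (List String))).items
          (fun x => x.1) true).foldl
      (fun acc pr => pr.2.foldl
        (fun acc2 name => acc2 ++ [name ++ "," ++ PySem.Int.toStr pr.1]) acc) []
    = (PySem.List.sorted teams (fun t => t.2.1 * 3 + t.2.2.2) true).map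
        (fun t => t.1 ++ "," ++ PySem.Int.toStr (t.2.1 * 3 + t.2.2.2)) := by
  -- A's branching step is exactly Dict.modify
  have hstep : teams.foldl (fun d t =>
        let points := t.2.1 * 3 + t.2.2.2
        if d.contains points then d.modify points [] (fun l => l ++ [t.1])
        else d.insert points [t.1]) (PySem.Dict.empty : PySem.Dict Int (List String))
      = teams.foldl (fun d t =>
          d.modify (t.2.1 * 3 + t.2.2.2) [] (fun l => l ++ [t.1])) PySem.Dict.empty := by
    congr 1
    funext d t
    by_cases h : d.contains (t.2.1 * 3 + t.2.2.2)
    · simp [h]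
    · simp only [h, Bool.false_eq_true, if_false]
      simp [PySem.Dict.modify, PySem.Dict.getD_of_not_contains _ _ (by simpa using h)]
  rw [hstep]
  set d := teams.foldl (fun d t =>
      d.modify (t.2.1 * 3 + t.2.2.2) [] (fun l => l ++ [t.1])) PySem.Dict.empty with hd
  have hkeys : d.keys = PySem.List.dedup (teams.map (fun t => t.2.1 * 3 + t.2.2.2)) := by
    rw [hd]
    have := PySem.Dict.keys_foldl_modify_key teams (fun t => t.2.1 * 3 + t.2.2.2) []
      (fun _ t => fun l => l ++ [t.1]) PySem.Dict.empty
    simpa [PySem.Dict.keys_empty, PySem.Set.update, PySem.Set.ofList,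
      PySem.List.dedup_eq_ofList] using this
  have hnodup : d.keys.Nodup := by
    rw [hd]
    exact PySem.Dict.nodup_keys_foldl_modify_key teams (fun t => t.2.1 * 3 + t.2.2.2) []
      (fun _ t => fun l => l ++ [t.1]) PySem.Dict.empty (by simp [PySem.Dict.keys_empty])
  have hgetD : ∀ c, d.getD c [] =
      (teams.filter (fun t => t.2.1 * 3 + t.2.2.2 == c)).map (fun t => t.1) := by
    intro c
    have h1 : d = (teams.map (fun t => ((t.2.1 * 3 + t.2.2.2 : Int), t.1))).foldl
        (fun d pr => d.modify pr.1 [] (fun l => l ++ [pr.2])) PySem.Dict.empty := by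
      rw [hd, List.foldl_map]
    rw [h1, PySem.Dict.getD_foldl_modify_append]
    rw [List.filter_map]
    simp only [PySem.Dict.getD_empty, List.nil_append]
    rw [List.map_map, List.filter_congr (fun (a : String × Int × Int × Int) _ => (rfl :
      ((fun (p : Int × String) => p.1 == c) ∘ fun t => ((t.2.1 * 3 + t.2.2.2 : Int), t.1)) a
        = (a.2.1 * 3 + a.2.2.2 == c)))]
    exact List.map_congr_left (fun a _ => rfl)
  have hitems : d.items =
      (PySem.List.dedup (teams.map (fun t => t.2.1 * 3 + t.2.2.2))).map
        (fun p => (p, (teams.filter (fun t => t.2.1 * 3 + t.2.2.2 == p)).map (fun t => t.1))) := by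
    rw [pv_items_eq d hnodup, hkeys]
    exact List.map_congr_left (fun p _ => by rw [hgetD p])
  have hsorted : PySem.List.sorted d.items (fun x => x.1) true =
      (PySem.List.sorted (PySem.List.dedup (teams.map (fun t => t.2.1 * 3 + t.2.2.2)))
          (fun p => p) true).map
        (fun p => (p, (teams.filter (fun t => t.2.1 * 3 + t.2.2.2 == p)).map (fun t => t.1))) := by
    apply PySem.List.sorted_rev_eq_of_perm_of_pairwise_gt
    · rw [hitems]
      exact (PySem.List.sorted_perm _ _ true).map _
    · exact (pv_sorted_rev_gt _ (PySem.List.nodup_dedup _)).map _ (fun a b h => h)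
  rw [hsorted]
  -- flatten A's nested emit loops
  have hfun : (fun (acc : List String) (pr : Int × List String) =>
        pr.2.foldl (fun acc2 name => acc2 ++ [name ++ "," ++ PySem.Int.toStr pr.1]) acc)
      = fun acc pr => acc ++ pr.2.map (fun name => name ++ "," ++ PySem.Int.toStr pr.1) := by
    funext acc pr
    exact PySem.List.foldl_append_singleton_eq_map _ _ _
  rw [hfun, PySem.List.foldl_append_eq_flatMap, List.nil_append, List.flatMap_map]
  -- the B side, through the stability of the descending sort
  rw [pv_sorted_rev_eq_flatMap (fun t => t.2.1 * 3 + t.2.2.2) teams, List.map_flatMap]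
  apply List.flatMap_congr
  intro p _
  rw [List.map_map]
  apply List.map_congr_left
  intro t ht
  have : t.2.1 * 3 + t.2.2.2 = p := by
    have := (List.mem_filter.mp ht).2
    simpa using this
  simp [Function.comp, this]

-- ===== VERDICT (by name: the statement is the Claim_ definition above) =====
theorem sort_teams_by_points_spec : Claim_equal_sort_teams_by_points := by
  intro teams include_blank_line _
  unfold Spec_sort_teams_by_points sort_teams_by_points sort_teams_by_points_alt
  by_cases h : teams = []
  · simp [h]
  · simp only [h, if_false]
    rw [pv_core teams]
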